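-- pv_equiv track=rewrite | github.com/MendozaLab/erdos-experiments | Erdos30/paper/attack_a_test.py | is_sidon
-- ===== SOURCE A (Python) =====
-- def is_sidon(A):
--     sums = set()
--     for i in range(len(A)):
--         for j in range(i, len(A)):
--             s = A[i] + A[j]
--             if s in sums:
--                 return False
--             sums.add(s)
--     return True
-- ===== SOURCE B (Python) =====
-- def is_sidon(A):
--     n = len(A)
--     L = sorted(A[i] + A[j] for i in range(n) for j in range(i, n))
--     return all(x != y for x, y in zip(L, L[1:]))
-- ===== Notes on version B (the rewrite author's own statement) =====
-- stated objective: alternative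
-- what changed: Replaces the incremental hash-set with early exit by a build-then-check pass: materialise all pairwise sums (i<=j), sort them, and report a duplicate iff some adjacent pair of the sorted list is equal.
import Mathlib
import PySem

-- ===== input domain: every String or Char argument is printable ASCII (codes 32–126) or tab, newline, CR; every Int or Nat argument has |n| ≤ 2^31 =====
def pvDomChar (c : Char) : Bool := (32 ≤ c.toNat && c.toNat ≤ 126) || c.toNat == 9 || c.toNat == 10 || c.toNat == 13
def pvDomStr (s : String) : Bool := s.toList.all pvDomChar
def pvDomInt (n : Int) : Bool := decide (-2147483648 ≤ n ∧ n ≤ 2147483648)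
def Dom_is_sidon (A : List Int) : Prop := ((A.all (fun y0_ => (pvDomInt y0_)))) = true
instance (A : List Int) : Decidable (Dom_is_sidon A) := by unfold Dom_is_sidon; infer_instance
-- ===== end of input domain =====

-- B replaces A's incremental hash-set with early exit by a build-then-check pass: collect all
-- pairwise sums (i ≤ j), sort them, and look for an equal adjacent pair (objective: alternative).

-- ===== PORT A =====
-- body of A's inner loop: state is `none` once `return False` has fired, else `some sums`
def stepA (st : Option (PySem.Set Int)) (s : Int) : Option (PySem.Set Int) :=
  match st with
  | none => none
  | some sums => if PySem.Set.contains sums s then none else some (PySem.Set.add sums s)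

def is_sidon (A : List Int) : Bool :=
  ((PySem.List.pyRange 0 (A.length : Int) 1).foldl
    (fun st i =>
      (PySem.List.pyRange i (A.length : Int) 1).foldl
        (fun st j => stepA st (PySem.List.pyGetD A i 0 + PySem.List.pyGetD A j 0)) st)
    (some (PySem.Set.empty))).isSome

-- ===== PORT B =====
def is_sidon_alt (A : List Int) : Bool :=
  let L := PySem.List.sorted
    ((PySem.List.pyRange 0 (A.length : Int) 1).flatMap (fun i =>
      (PySem.List.pyRange i (A.length : Int) 1).map (fun j =>
        PySem.List.pyGetD A i 0 + PySem.List.pyGetD A j 0)))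
    (fun x => x) false
  (L.zip (PySem.List.slice L (some 1) none)).all (fun p => !(p.1 == p.2))

-- ===== PRECONDITION & SPEC =====
def Spec_is_sidon (A : List Int) (out : Bool) : Prop := out = is_sidon_alt A
instance (A : List Int) (out : Bool) : Decidable (Spec_is_sidon A out) := by unfold Spec_is_sidon; infer_instance

-- ===== CLAIM (what is proved, stated in full; the proofs are below) =====
def Claim_equal_is_sidon : Prop := ∀ (A : List Int), Dom_is_sidon A → Spec_is_sidon A (is_sidon A)

-- ===== LEMMAS AND PROOFS =====

-- the multiset of pairwise sums, in A's generation order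
def sumsList (A : List Int) : List Int :=
  (PySem.List.pyRange 0 (A.length : Int) 1).flatMap (fun i =>
    (PySem.List.pyRange i (A.length : Int) 1).map (fun j =>
      PySem.List.pyGetD A i 0 + PySem.List.pyGetD A j 0))

lemma foldl_stepA_none (ss : List Int) : ss.foldl stepA none = none := by
  induction ss with
  | nil => rfl
  | cons s t ih => simpa [stepA] using ih

lemma scan_isSome (ss : List Int) : ∀ (sums : PySem.Set Int),
    ((ss.foldl stepA (some sums)).isSome = true ↔ ss.Nodup ∧ ∀ s ∈ ss, s ∉ sums) := by
  induction ss with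
  | nil => simp
  | cons s t ih =>
    intro sums
    simp only [List.foldl_cons, stepA]
    by_cases h : s ∈ sums
    · rw [if_pos (by simpa [PySem.Set.contains_iff] using h)]
      simp only [foldl_stepA_none, Option.isSome_none]
      constructor
      · intro hf; cases hf
      · rintro ⟨-, hall⟩; exact absurd h (hall s (by simp))
    · rw [if_neg (by simpa [PySem.Set.contains_iff] using h)]
      rw [ih]
      simp only [List.nodup_cons, List.mem_cons, PySem.Set.mem_add]
      constructor
      · rintro ⟨hnd, hall⟩
        refine ⟨⟨fun hst => (hall s hst) (Or.inr rfl), hnd⟩, ?_⟩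
        rintro x (rfl | hx)
        · exact h
        · exact fun hmem => (hall x hx) (Or.inl hmem)
      · rintro ⟨⟨hst, hnd⟩, hall⟩
        refine ⟨hnd, fun x hx => ?_⟩
        rintro (hmem | rfl)
        · exact (hall x (Or.inr hx)) hmem
        · exact hst hx

lemma is_sidon_iff_nodup (A : List Int) : is_sidon A = true ↔ (sumsList A).Nodup := by
  unfold is_sidon
  have hfold :
      (PySem.List.pyRange 0 (A.length : Int) 1).foldl
        (fun st i =>
          (PySem.List.pyRange i (A.length : Int) 1).foldl
            (fun st j => stepA st (PySem.List.pyGetD A i 0 + PySem.List.pyGetD A j 0)) st)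
        (some (PySem.Set.empty))
      = (sumsList A).foldl stepA (some PySem.Set.empty) := by
    rw [sumsList, List.foldl_flatMap]
    apply PySem.List.foldl_congr_mem
    intro acc i _
    exact (List.foldl_map ..).symm
  rw [hfold, scan_isSome]
  simp [PySem.Set.empty]

lemma pairwise_lt_of (l : List Int) (h1 : l.Pairwise (· ≤ ·)) (h2 : l.Pairwise (· ≠ ·)) :
    l.Pairwise (· < ·) := by
  induction l with
  | nil => exact List.Pairwise.nil
  | cons x t ih =>
    rw [List.pairwise_cons] at h1 h2 ⊢
    exact ⟨fun y hy => lt_of_le_of_ne (h1.1 y hy) (h2.1 y hy), ih h1.2 h2.2⟩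

lemma chain_lt_of (l : List Int) (h1 : l.Pairwise (· ≤ ·)) (h2 : l.IsChain (· ≠ ·)) :
    l.IsChain (· < ·) := by
  induction l with
  | nil => exact List.IsChain.nil
  | cons x t ih =>
    cases t with
    | nil => exact List.isChain_singleton x
    | cons y t' =>
      rw [List.isChain_cons_cons] at h2 ⊢
      rw [List.pairwise_cons] at h1
      exact ⟨lt_of_le_of_ne (h1.1 y (by simp)) h2.1, ih h1.2 h2.2⟩

lemma chain_ne_of_pairwise_lt (l : List Int) (h : l.Pairwise (· < ·)) :
    l.IsChain (· ≠ ·) := by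
  have := List.isChain_iff_pairwise.mpr h
  exact this.imp (by intro a b hab; exact ne_of_lt hab)

lemma zip_tail_all (S : List Int) :
    ((S.zip S.tail).all (fun p => !(p.1 == p.2)) = true) ↔ S.IsChain (· ≠ ·) := by
  induction S with
  | nil => simp
  | cons x t ih =>
    cases t with
    | nil => simp
    | cons y t' =>
      rw [List.isChain_cons_cons, ← ih]
      simp [List.zip_cons_cons]

lemma alt_iff_nodup (A : List Int) : is_sidon_alt A = true ↔ (sumsList A).Nodup := by
  have hshow : is_sidon_alt A =
      ((PySem.List.sorted (sumsList A) (fun x => x) false).zip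
        (PySem.List.slice (PySem.List.sorted (sumsList A) (fun x => x) false) (some 1) none)).all
        (fun p => !(p.1 == p.2)) := rfl
  rw [hshow, PySem.List.slice_from_one, zip_tail_all]
  have hle : (PySem.List.sorted (sumsList A) (fun x => x) false).Pairwise (· ≤ ·) :=
    PySem.List.sorted_pairwise (xs := sumsList A) (key := fun x => x)
  have hperm : (PySem.List.sorted (sumsList A) (fun x => x) false).Perm (sumsList A) :=
    PySem.List.sorted_perm (sumsList A) (fun x => x) false
  constructor
  · intro hch
    have hlt := chain_lt_of _ hle (by exact hch)
    have hpw := List.isChain_iff_pairwise.mp hlt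
    exact hperm.nodup_iff.mp (hpw.imp (fun hab => ne_of_lt hab))
  · intro hnd
    have hne : (PySem.List.sorted (sumsList A) (fun x => x) false).Pairwise (· ≠ ·) :=
      hperm.nodup_iff.mpr hnd
    exact chain_ne_of_pairwise_lt _ (pairwise_lt_of _ hle hne)

-- ===== VERDICT (by name: the statement is the Claim_ definition above) =====
theorem is_sidon_spec : Claim_equal_is_sidon := by
  intro A _
  unfold Spec_is_sidon
  rw [Bool.eq_iff_iff, is_sidon_iff_nodup, alt_iff_nodup]
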